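-- pv_equiv track=rewrite | github.com/jparkhill/TensorMol | Util.py | Binominal_Combination
-- ===== SOURCE A (Python) =====
-- import itertools
--
-- def Binominal_Combination(indis=[0,1,2], group=3):
-- 	if (group==1):
-- 		index=list(itertools.permutations(indis))
-- 		new_index =[]
-- 		for i in range (0, len(index)):
-- 			new_index.append(list(index[i]))
-- 		return new_index
-- 	else:
-- 		index=list(itertools.permutations(indis))
-- 		new_index=[]
-- 		for sub_list in Binominal_Combination(indis, group-1):
-- 			for sub_index in index:
-- 				new_index.append(list(sub_list)+list(sub_index))
-- 		return new_index
-- ===== SOURCE B (Python) =====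
-- import itertools
--
-- def Binominal_Combination(indis=[0,1,2], group=3):
--     perms = list(itertools.permutations(indis))
--     result = []
--     for combo in itertools.product(perms, repeat=group):
--         flat = []
--         for p in combo:
--             flat.extend(p)
--         result.append(flat)
--     return result
-- ===== Notes on version B (the rewrite author's own statement) =====
-- stated objective: idiomatic
-- what changed: Replaced A's recursion on group (with nested append loops) by a single iterative pass over itertools.product(permutations(indis), repeat=group), flattening each produced tuple of permutations.
import Mathlib
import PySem

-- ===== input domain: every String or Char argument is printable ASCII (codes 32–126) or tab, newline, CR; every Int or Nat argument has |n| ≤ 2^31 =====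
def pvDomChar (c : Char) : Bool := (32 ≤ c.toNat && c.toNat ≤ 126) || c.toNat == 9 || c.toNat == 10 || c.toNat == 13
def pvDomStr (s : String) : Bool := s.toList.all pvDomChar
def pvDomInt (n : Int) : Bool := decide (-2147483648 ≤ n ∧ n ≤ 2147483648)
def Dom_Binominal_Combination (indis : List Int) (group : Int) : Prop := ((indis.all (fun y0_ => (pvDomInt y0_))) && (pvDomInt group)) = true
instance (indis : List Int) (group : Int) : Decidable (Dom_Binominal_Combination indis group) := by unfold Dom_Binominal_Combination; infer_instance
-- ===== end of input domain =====

-- B replaces A's recursion on `group` by one iterative pass over the repeated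
-- cartesian product of the permutation list, flattening each tuple (idiomatic).

-- ===== PORT A =====
-- Recursion of A on the (positive) value of group; fuel 0 stands for the
-- group < 1 inputs on which Python A never returns (excluded by Pre_).
def pvAGo (indis : List Int) : Nat → List (List Int)
  | 0 => []
  | 1 =>
      let index := PySem.List.permutations indis indis.length
      (List.range index.length).foldl (fun acc i => acc ++ [index.getD i []]) []
  | (n+2) =>
      let index := PySem.List.permutations indis indis.length
      (pvAGo indis (n+1)).foldl
        (fun acc sub_list => index.foldl (fun acc2 sub_index => acc2 ++ [sub_list ++ sub_index]) acc) []

def Binominal_Combination (indis : List Int) (group : Int) : List (List Int) :=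
  pvAGo indis group.toNat

-- ===== PORT B =====
-- itertools.product(perms, repeat=n): first factor varies slowest.
def pvProdRepeat (perms : List (List Int)) : Nat → List (List (List Int))
  | 0 => [[]]
  | (n+1) => perms.flatMap (fun x => (pvProdRepeat perms n).map (fun c => x :: c))

def Binominal_Combination_alt (indis : List Int) (group : Int) : List (List Int) :=
  let perms := PySem.List.permutations indis indis.length
  (pvProdRepeat perms group.toNat).foldl
    (fun result combo => result ++ [combo.foldl (fun flat p => flat ++ p) []]) []

-- ===== PRECONDITION & SPEC =====
-- Python A infinitely recurses (RecursionError) for group < 1, so Pre_ is group ≥ 1.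
def Pre_Binominal_Combination (indis : List Int) (group : Int) : Prop := 1 ≤ group
instance (indis : List Int) (group : Int) : Decidable (Pre_Binominal_Combination indis group) := by unfold Pre_Binominal_Combination; infer_instance
def pvWitness_Binominal_Combination : List Int × Int := ([0, 1], 2)

def Spec_Binominal_Combination (indis : List Int) (group : Int) (out : List (List Int)) : Prop := out = Binominal_Combination_alt indis group
instance (indis : List Int) (group : Int) (out : List (List Int)) : Decidable (Spec_Binominal_Combination indis group out) := by unfold Spec_Binominal_Combination; infer_instance

-- ===== CLAIM (what is proved, stated in full; the proofs are below) =====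
def Claim_equal_Binominal_Combination : Prop := ∀ (indis : List Int) (group : Int), Dom_Binominal_Combination indis group → Pre_Binominal_Combination indis group → Spec_Binominal_Combination indis group (Binominal_Combination indis group)

-- ===== LEMMAS AND PROOFS =====

theorem foldl_append_seg {α β : Type} (g : α → List β) :
    ∀ (l : List α) (init : List β),
      l.foldl (fun acc s => acc ++ g s) init = init ++ l.flatMap g := by
  intro l
  induction l with
  | nil => intro init; simp
  | cons x xs ih => intro init; simp [List.foldl, ih, List.append_assoc]

theorem range_getD {α : Type} (l : List α) (d : α) :
    (List.range l.length).map (fun i => l.getD i d) = l := by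
  apply List.ext_getElem
  · simp
  · intro i h1 h2
    simp [List.getD_eq_getElem?_getD, List.getElem?_eq_getElem h2]

theorem flatten_singleton {α β : Type} (f : α → β) :
    ∀ (l : List α), (l.map (fun x => [f x])).flatten = l.map f := by
  intro l; induction l with
  | nil => rfl
  | cons x xs ih => simp [ih]

theorem prodRepeat_snoc (perms : List (List Int)) :
    ∀ n, pvProdRepeat perms (n+1)
      = (pvProdRepeat perms n).flatMap (fun c => perms.map (fun x => c ++ [x])) := by
  intro n
  induction n with
  | zero =>
    show _ = List.flatMap (fun c => perms.map (fun x => c ++ [x])) [[]]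
    simp [pvProdRepeat, List.flatMap, flatten_singleton]
  | succ n ih =>
    conv_lhs => rw [pvProdRepeat, ih]
    rw [pvProdRepeat]
    simp only [List.flatMap_assoc, List.map_flatMap, List.flatMap_map, List.map_map]
    apply List.flatMap_congr
    intro x _
    simp [Function.comp_def]

theorem aGo_eq (indis : List Int) :
    ∀ n, pvAGo indis (n+1)
      = (pvProdRepeat (PySem.List.permutations indis indis.length) (n+1)).map
          (fun c => c.foldl (fun flat p => flat ++ p) []) := by
  intro n
  induction n with
  | zero =>
    simp only [pvAGo, pvProdRepeat, PySem.List.foldl_append_singleton_eq_map, range_getD,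
      List.nil_append, List.flatMap]
    simp only [List.map_cons, List.map_nil]
    rw [flatten_singleton (fun x => [x]), List.map_map]
    symm
    refine (List.map_congr_left ?_).trans (List.map_id _)
    intro x _
    simp [Function.comp]
  | succ n ih =>
    show pvAGo indis (n+2) = _
    rw [pvAGo]
    simp only [ih]
    rw [show (∀ (l : List (List Int)) (init : List (List Int)),
        l.foldl (fun acc s => (PySem.List.permutations indis indis.length).foldl
            (fun acc2 p => acc2 ++ [s ++ p]) acc) init
          = l.foldl (fun acc s => acc ++ (PySem.List.permutations indis indis.length).map (fun p => s ++ p)) init)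
        from by
          intro l; induction l with
          | nil => intro init; rfl
          | cons x xs ihl =>
            intro init
            rw [List.foldl_cons, List.foldl_cons, ihl, PySem.List.foldl_append_singleton_eq_map]]
    rw [foldl_append_seg]
    conv_rhs => rw [show n + 1 + 1 = (n + 1) + 1 from rfl, prodRepeat_snoc]
    simp only [List.nil_append, List.map_flatMap, List.flatMap_map, List.map_map]
    apply List.flatMap_congr
    intro c _
    apply List.map_congr_left
    intro x _
    simp [Function.comp, List.foldl_append]

-- ===== VERDICT (by name: the statement is the Claim_ definition above) =====
theorem Binominal_Combination_spec : Claim_equal_Binominal_Combination := by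
  intro indis group _ hpre
  unfold Spec_Binominal_Combination Binominal_Combination Binominal_Combination_alt
  have h1 : 1 ≤ group.toNat := by
    unfold Pre_Binominal_Combination at hpre; omega
  obtain ⟨n, hn⟩ : ∃ n, group.toNat = n + 1 := ⟨group.toNat - 1, by omega⟩
  rw [hn, aGo_eq, PySem.List.foldl_append_singleton_eq_map, List.nil_append]
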